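-- pv_equiv track=rewrite | github.com/tomasmb/arborschool-content | scripts/notation_fix_rules.py | _split_mn_content
-- ===== SOURCE A (Python) =====
-- _OPERATOR_CHARS = {
--     "+", "-", "×", "÷", "=",
--     "\u2212",  # minus sign
--     "\u00d7",  # multiplication sign
--     "\u00f7",  # division sign
-- }
--
-- _OPERATOR_ENTITIES = {
--     "&#x2212;": "\u2212",
--     "&#x00D7;": "\u00d7",
--     "&#x00d7;": "\u00d7",
--     "&#xD7;": "\u00d7",
--     "&#xd7;": "\u00d7",
--     "&#x00F7;": "\u00f7",
--     "&#x00f7;": "\u00f7",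
--     "&#215;": "\u00d7",
--     "&#8722;": "\u2212",
-- }
--
-- def _decode_entities(text: str) -> str:
--     """Decode known operator entities to characters."""
--     for entity, char in _OPERATOR_ENTITIES.items():
--         text = text.replace(entity, char)
--     return text
--
-- def _encode_operator(char: str) -> str:
--     """Encode an operator character back to an entity for MathML."""
--     mapping = {
--         "\u2212": "&#x2212;",
--         "\u00d7": "&#xD7;",
--         "\u00f7": "&#xF7;",
--         "+": "+",
--         "-": "&#x2212;",
--         "=": "=",
--         "×": "&#xD7;",
--         "÷": "&#xF7;",
--     }
--     return mapping.get(char, char)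
--
-- def _split_mn_content(inner: str) -> str | None:
--     """Split <mn> content with operators into proper MathML.
--
--     Returns None if no splitting needed.
--     ``5×4`` -> ``<mn>5</mn><mo>&#xD7;</mo><mn>4</mn>``
--     ``-13000`` -> ``<mo>&#x2212;</mo><mn>13000</mn>``
--     """
--     decoded = _decode_entities(inner)
--     has_op = any(c in _OPERATOR_CHARS for c in decoded)
--     if not has_op:
--         return None
--
--     parts: list[str] = []
--     current_digits: list[str] = []
--
--     for char in decoded:
--         if char in _OPERATOR_CHARS:
--             if current_digits:
--                 parts.append(f"<mn>{''.join(current_digits)}</mn>")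
--                 current_digits = []
--             parts.append(f"<mo>{_encode_operator(char)}</mo>")
--         else:
--             current_digits.append(char)
--
--     if current_digits:
--         parts.append(f"<mn>{''.join(current_digits)}</mn>")
--
--     result = "".join(parts)
--     if result == f"<mn>{inner}</mn>":
--         return None
--     if len(parts) > 1:
--         result = f"<mrow>{result}</mrow>"
--     return result
-- ===== SOURCE B (Python) =====
-- _OPERATOR_CHARS = {
--     "+", "-", "\u00d7", "\u00f7", "=",
--     "\u2212", "\u00d7", "\u00f7",
-- }
--
-- _OPERATOR_ENTITIES = {
--     "&#x2212;": "\u2212",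
--     "&#x00D7;": "\u00d7",
--     "&#x00d7;": "\u00d7",
--     "&#xD7;": "\u00d7",
--     "&#xd7;": "\u00d7",
--     "&#x00F7;": "\u00f7",
--     "&#x00f7;": "\u00f7",
--     "&#215;": "\u00d7",
--     "&#8722;": "\u2212",
-- }
--
-- def _decode_entities(text):
--     for entity, char in _OPERATOR_ENTITIES.items():
--         text = text.replace(entity, char)
--     return text
--
-- def _encode_operator(char):
--     mapping = {
--         "\u2212": "&#x2212;",
--         "\u00d7": "&#xD7;",
--         "\u00f7": "&#xF7;",
--         "+": "+",
--         "-": "&#x2212;",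
--         "=": "=",
--     }
--     return mapping.get(char, char)
--
-- def _tokenize(s):
--     """Recursively split into operator chars and maximal non-operator runs."""
--     if not s:
--         return []
--     if s[0] in _OPERATOR_CHARS:
--         return [s[0]] + _tokenize(s[1:])
--     i = 0
--     while i < len(s) and s[i] not in _OPERATOR_CHARS:
--         i += 1
--     return [s[:i]] + _tokenize(s[i:])
--
-- def _split_mn_content(inner):
--     decoded = _decode_entities(inner)
--     if not any(c in _OPERATOR_CHARS for c in decoded):
--         return None
--     parts = [
--         f"<mo>{_encode_operator(t)}</mo>" if t in _OPERATOR_CHARS else f"<mn>{t}</mn>"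
--         for t in _tokenize(decoded)
--     ]
--     result = "".join(parts)
--     if result == f"<mn>{inner}</mn>":
--         return None
--     if len(parts) > 1:
--         result = f"<mrow>{result}</mrow>"
--     return result
-- ===== Notes on version B (the rewrite author's own statement) =====
-- stated objective: simpler
-- what changed: Replaced A's single loop with a mutable digit buffer and inline flushes by a recursive tokenizer (operator char vs maximal non-operator run) followed by one comprehension mapping tokens to <mo>/<mn> parts; decode, has-op check and tail are unchanged.
import Mathlib
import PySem

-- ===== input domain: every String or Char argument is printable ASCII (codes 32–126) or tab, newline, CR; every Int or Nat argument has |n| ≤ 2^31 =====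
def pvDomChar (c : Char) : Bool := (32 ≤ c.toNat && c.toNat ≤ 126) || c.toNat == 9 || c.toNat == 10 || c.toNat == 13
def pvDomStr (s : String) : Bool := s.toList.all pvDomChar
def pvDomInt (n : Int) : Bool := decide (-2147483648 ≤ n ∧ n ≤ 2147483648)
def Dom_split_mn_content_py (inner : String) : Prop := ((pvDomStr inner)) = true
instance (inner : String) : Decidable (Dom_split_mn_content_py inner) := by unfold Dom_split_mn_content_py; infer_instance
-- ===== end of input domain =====

-- B replaces A's character-by-character digit-buffer accumulation by a recursive
-- tokenizer (operator char / maximal non-operator run) plus a single mapping pass;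
-- objective: simpler decomposition, same cost.

-- ===== PORT A =====
-- shared module context: operator set, entity decode, operator encode
def pvIsOp (c : Char) : Bool :=
  ['+', '-', '\u00d7', '\u00f7', '=', '\u2212'].contains c

def pvDecode (text : String) : String :=
  let t := PySem.Str.replace text "&#x2212;" "\u2212"
  let t := PySem.Str.replace t "&#x00D7;" "\u00d7"
  let t := PySem.Str.replace t "&#x00d7;" "\u00d7"
  let t := PySem.Str.replace t "&#xD7;" "\u00d7"
  let t := PySem.Str.replace t "&#xd7;" "\u00d7"
  let t := PySem.Str.replace t "&#x00F7;" "\u00f7"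
  let t := PySem.Str.replace t "&#x00f7;" "\u00f7"
  let t := PySem.Str.replace t "&#215;" "\u00d7"
  let t := PySem.Str.replace t "&#8722;" "\u2212"
  t

def pvEncode (c : Char) : String :=
  if c = '\u2212' then "&#x2212;"
  else if c = '\u00d7' then "&#xD7;"
  else if c = '\u00f7' then "&#xF7;"
  else if c = '+' then "+"
  else if c = '-' then "&#x2212;"
  else if c = '=' then "="
  else String.ofList [c]

def pvMn (buf : List Char) : String := "<mn>" ++ String.ofList buf ++ "</mn>"
def pvMo (c : Char) : String := "<mo>" ++ pvEncode c ++ "</mo>"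

-- A's loop body: state = (parts, current_digits)
def pvStepA (st : List String × List Char) (c : Char) : List String × List Char :=
  if pvIsOp c then
    let parts := if st.2 ≠ [] then st.1 ++ [pvMn st.2] else st.1
    (parts ++ [pvMo c], [])
  else (st.1, st.2 ++ [c])

-- A's trailing flush: 'if current_digits: parts.append(...)'
def pvFinal (st : List String × List Char) : List String :=
  if st.2 ≠ [] then st.1 ++ [pvMn st.2] else st.1

def split_mn_content_py (inner : String) : Option String :=
  let decoded := pvDecode inner
  let hasOp := decoded.toList.any pvIsOp
  if !hasOp then none
  else
    let parts := pvFinal (decoded.toList.foldl pvStepA ([], []))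
    let result := PySem.Str.join "" parts
    if result = "<mn>" ++ inner ++ "</mn>" then none
    else if parts.length > 1 then some ("<mrow>" ++ result ++ "</mrow>")
    else some result

-- ===== PORT B =====
-- Source B's _tokenize: operator char, or maximal non-operator run (the while loop = takeWhile/dropWhile)
def pvTokenize : List Char → List (List Char)
  | [] => []
  | c :: cs =>
    if pvIsOp c then [c] :: pvTokenize cs
    else (c :: cs.takeWhile (fun x => !pvIsOp x)) :: pvTokenize (cs.dropWhile (fun x => !pvIsOp x))
termination_by s => s.length
decreasing_by
  · simp
  · have := cs.length_dropWhile_le (fun x => !pvIsOp x); simp; omega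

-- Source B's comprehension body: 't in _OPERATOR_CHARS' is true iff t is a single operator char
def pvRender (t : List Char) : String :=
  match t with
  | [c] => if pvIsOp c then pvMo c else pvMn t
  | _ => pvMn t

def split_mn_content_py_alt (inner : String) : Option String :=
  let decoded := pvDecode inner
  if !(decoded.toList.any pvIsOp) then none
  else
    let parts := (pvTokenize decoded.toList).map pvRender
    let result := PySem.Str.join "" parts
    if result = "<mn>" ++ inner ++ "</mn>" then none
    else if parts.length > 1 then some ("<mrow>" ++ result ++ "</mrow>")
    else some result

-- ===== PRECONDITION & SPEC =====
def Spec_split_mn_content_py (inner : String) (out : Option String) : Prop := out = split_mn_content_py_alt inner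
instance (inner : String) (out : Option String) : Decidable (Spec_split_mn_content_py inner out) := by unfold Spec_split_mn_content_py; infer_instance

-- ===== CLAIM (what is proved, stated in full; the proofs are below) =====
def Claim_equal_split_mn_content_py : Prop := ∀ (inner : String), Dom_split_mn_content_py inner → Spec_split_mn_content_py inner (split_mn_content_py inner)

-- ===== LEMMAS AND PROOFS =====

-- the parts A's loop still owes, given pending buffer buf and remaining input
def pvG : List Char → List Char → List String
  | buf, [] => if buf ≠ [] then [pvMn buf] else []
  | buf, c :: cs =>
    if pvIsOp c then (if buf ≠ [] then [pvMn buf] else []) ++ pvMo c :: pvG [] cs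
    else pvG (buf ++ [c]) cs

theorem pvFoldA_eq_pvG (cs : List Char) : ∀ (P : List String) (buf : List Char),
    pvFinal (cs.foldl pvStepA (P, buf)) = P ++ pvG buf cs := by
  induction cs with
  | nil => intro P buf; simp [pvFinal, pvG]; split <;> simp
  | cons c cs ih =>
    intro P buf
    simp only [List.foldl_cons, pvStepA, pvG]
    by_cases h : pvIsOp c = true
    · simp only [h, if_pos, ih]; split <;> simp
    · simp [h, ih]

theorem pvG_buf (cs : List Char) : ∀ buf : List Char, buf ≠ [] →
    pvG buf cs = pvMn (buf ++ cs.takeWhile (fun x => !pvIsOp x)) ::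
      pvG [] (cs.dropWhile (fun x => !pvIsOp x)) := by
  induction cs with
  | nil => intro buf h; simp [pvG, h]
  | cons c cs ih =>
    intro buf h
    by_cases hc : pvIsOp c = true
    · simp [pvG, hc, h]
    · simp only [pvG, hc, if_neg, Bool.false_eq_true, not_false_eq_true,
        List.takeWhile_cons, List.dropWhile_cons]
      rw [ih (buf ++ [c]) (by simp)]
      simp

theorem pvG_nil_eq_tokenize (cs : List Char) :
    pvG [] cs = (pvTokenize cs).map pvRender := by
  fun_induction pvTokenize cs with
  | case1 => simp [pvG]
  | case2 c cs h ih =>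
    simp [pvG, h, pvRender, List.map_cons, ih]
  | case3 c cs h ih =>
    simp only [pvG, h, if_neg, Bool.false_eq_true, not_false_eq_true]
    rw [List.nil_append, pvG_buf cs [c] (by simp)]
    simp only [List.map_cons, ih, List.singleton_append]
    congr 1
    cases htw : cs.takeWhile (fun x => !pvIsOp x) with
    | nil => simp [pvRender, h]
    | cons d ds => simp [pvRender]

-- ===== VERDICT (by name: the statement is the Claim_ definition above) =====
theorem split_mn_content_py_spec : Claim_equal_split_mn_content_py := by
  intro inner _
  unfold Spec_split_mn_content_py split_mn_content_py split_mn_content_py_alt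
  simp only [pvFoldA_eq_pvG, pvG_nil_eq_tokenize, List.nil_append]
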